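-- pv_equiv track=rewrite | github.com/mhdroz/ace_medium | src/ace.py | _format_playbook
-- ===== SOURCE A (Python) =====
-- from typing import Dict
--
-- def _format_playbook(playbook: Dict, section: str = "all") -> str:
--     """Format playbook for prompt inclusion"""
--     if not any(playbook.values()):
--         return "No strategies learned yet. This is your first case."
--
--     formatted = ""
--
--     if section in ["all", "extraction"] and playbook.get("extraction_strategies"):
--         formatted += "EXTRACTION STRATEGIES:\n"
--         for i, strategy in enumerate(playbook["extraction_strategies"], 1):
--             formatted += f"{i}. {strategy}\n"
--
--     if section in ["all", "validation"] and playbook.get("validation_strategies"):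
--         if formatted:
--             formatted += "\n"
--         formatted += "VALIDATION STRATEGIES:\n"
--         for i, strategy in enumerate(playbook["validation_strategies"], 1):
--             formatted += f"{i}. {strategy}\n"
--
--     if section in ["all", "formatting"] and playbook.get("formatting_patterns"):
--         if formatted:
--             formatted += "\n"
--         formatted += "FORMATTING PATTERNS:\n"
--         for i, pattern in enumerate(playbook["formatting_patterns"], 1):
--             formatted += f"{i}. {pattern}\n"
--
--     return formatted if formatted else "No strategies learned yet for this section."
-- ===== SOURCE B (Python) =====
-- _SPECS = [
--     ("extraction", "extraction_strategies", "EXTRACTION STRATEGIES:"),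
--     ("validation", "validation_strategies", "VALIDATION STRATEGIES:"),
--     ("formatting", "formatting_patterns", "FORMATTING PATTERNS:"),
-- ]
--
--
-- def _numbered(items, n):
--     """Numbered lines '1. x\\n..n. y\\n', built by recursion on the count n."""
--     if n == 0:
--         return ""
--     return _numbered(items, n - 1) + f"{n}. {items[n - 1]}\n"
--
--
-- def _render(specs, playbook, section):
--     """Render the remaining sections suffix-first by recursion on the spec list."""
--     if not specs:
--         return ""
--     name, key, header = specs[0]
--     suffix = _render(specs[1:], playbook, section)
--     items = playbook.get(key)
--     if section in ("all", name) and items: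
--         block = header + "\n" + _numbered(items, len(items))
--         return block + "\n" + suffix if suffix else block
--     return suffix
--
--
-- def _format_playbook(playbook, section="all"):
--     """Format playbook for prompt inclusion (recursive, suffix-first rewrite)."""
--     if not any(playbook.values()):
--         return "No strategies learned yet. This is your first case."
--     rendered = _render(_SPECS, playbook, section)
--     return rendered if rendered else "No strategies learned yet for this section."
-- ===== Notes on version B (the rewrite author's own statement) =====
-- stated objective: alternative
-- what changed: Replaced A's single forward accumulator with three copy-pasted gated blocks and blank-line bookkeeping by a suffix-first recursion over a spec list (each section prepends its block onto the already-rendered rest), with the numbered lines produced by recursion on the item count indexing items[n-1] instead of an enumerate loop.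
import Mathlib
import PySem

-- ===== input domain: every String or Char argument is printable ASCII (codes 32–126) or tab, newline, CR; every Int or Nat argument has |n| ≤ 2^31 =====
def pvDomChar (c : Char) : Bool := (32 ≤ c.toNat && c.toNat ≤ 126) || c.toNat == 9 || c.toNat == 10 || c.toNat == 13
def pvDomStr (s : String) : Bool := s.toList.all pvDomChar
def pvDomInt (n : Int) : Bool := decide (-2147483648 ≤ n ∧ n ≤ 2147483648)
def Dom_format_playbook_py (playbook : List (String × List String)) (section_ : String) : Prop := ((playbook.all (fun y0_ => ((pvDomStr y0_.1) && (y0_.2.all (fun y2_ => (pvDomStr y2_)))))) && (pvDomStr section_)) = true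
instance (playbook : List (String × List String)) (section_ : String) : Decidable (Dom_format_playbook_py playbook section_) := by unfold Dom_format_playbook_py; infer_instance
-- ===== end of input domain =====

-- B renders the sections suffix-first by recursion over a spec list (numbered lines by
-- recursion on the count, indexing items[n-1]) instead of A's forward accumulator with
-- three copy-pasted gated blocks; same output, different decomposition.

-- ===== PORT A =====
-- A's inner for-loop: formatted += f"{i}. {strategy}\n", carried on the accumulator
def pvLinesA (i : Int) (acc : List Char) (xs : List String) : List Char :=
  match xs with
  | [] => acc
  | s :: rest => pvLinesA (i + 1) (acc ++ (PySem.Int.toStr i).toList ++ ". ".toList ++ s.toList ++ ['\n']) rest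

def format_playbook_py (playbook : List (String × List String)) (section_ : String) : String :=
  let d := PySem.Dict.ofList playbook
  if !(d.values.any (fun v => !v.isEmpty)) then
    "No strategies learned yet. This is your first case."
  else
    let f0 : List Char := []
    let f1 := if (section_ = "all" ∨ section_ = "extraction") ∧ d.getD "extraction_strategies" [] ≠ [] then
        pvLinesA 1 (f0 ++ "EXTRACTION STRATEGIES:\n".toList) (d.getD "extraction_strategies" [])
      else f0
    let f2 := if (section_ = "all" ∨ section_ = "validation") ∧ d.getD "validation_strategies" [] ≠ [] then
        pvLinesA 1 ((if f1 ≠ [] then f1 ++ "\n".toList else f1) ++ "VALIDATION STRATEGIES:\n".toList) (d.getD "validation_strategies" [])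
      else f1
    let f3 := if (section_ = "all" ∨ section_ = "formatting") ∧ d.getD "formatting_patterns" [] ≠ [] then
        pvLinesA 1 ((if f2 ≠ [] then f2 ++ "\n".toList else f2) ++ "FORMATTING PATTERNS:\n".toList) (d.getD "formatting_patterns" [])
      else f2
    if f3 ≠ [] then String.ofList f3 else "No strategies learned yet for this section."

-- ===== PORT B =====
-- B's _numbered(items, n): recursion on the count, line n indexes items[n-1]
-- (the index is always in range in every call B makes; getD's default is never used)
def pvNumbered (items : List String) : Nat → List Char
  | 0 => []
  | n + 1 => pvNumbered items n ++ (PySem.Int.toStr ((n : Int) + 1)).toList ++ ". ".toList ++ (items.getD n "").toList ++ ['\n']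

-- B's _render: suffix-first recursion over the spec list
def pvRender (d : PySem.Dict String (List String)) (section_ : String) : List (String × String × String) → List Char
  | [] => []
  | spec :: rest =>
    let suffix := pvRender d section_ rest
    let items := d.getD spec.2.1 []
    if (section_ = "all" ∨ section_ = spec.1) ∧ items ≠ [] then
      let block := spec.2.2.toList ++ ['\n'] ++ pvNumbered items items.length
      if suffix ≠ [] then block ++ ['\n'] ++ suffix else block
    else suffix

def format_playbook_py_alt (playbook : List (String × List String)) (section_ : String) : String :=
  let d := PySem.Dict.ofList playbook
  if !(d.values.any (fun v => !v.isEmpty)) then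
    "No strategies learned yet. This is your first case."
  else
    let rendered := pvRender d section_
      [("extraction", "extraction_strategies", "EXTRACTION STRATEGIES:"),
       ("validation", "validation_strategies", "VALIDATION STRATEGIES:"),
       ("formatting", "formatting_patterns", "FORMATTING PATTERNS:")]
    if rendered ≠ [] then String.ofList rendered else "No strategies learned yet for this section."

-- ===== PRECONDITION & SPEC =====
def Spec_format_playbook_py (playbook : List (String × List String)) (section_ : String) (out : String) : Prop := out = format_playbook_py_alt playbook section_
instance (playbook : List (String × List String)) (section_ : String) (out : String) : Decidable (Spec_format_playbook_py playbook section_ out) := by unfold Spec_format_playbook_py; infer_instance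

-- ===== CLAIM (what is proved, stated in full; the proofs are below) =====
def Claim_equal_format_playbook_py : Prop := ∀ (playbook : List (String × List String)) (section_ : String), Dom_format_playbook_py playbook section_ → Spec_format_playbook_py playbook section_ (format_playbook_py playbook section_)

-- ===== LEMMAS AND PROOFS =====

-- forward characterisation both loops are bridged to
def pvFwd (i : Int) (xs : List String) : List Char :=
  match xs with
  | [] => []
  | s :: rest => (PySem.Int.toStr i).toList ++ ". ".toList ++ s.toList ++ ['\n'] ++ pvFwd (i + 1) rest

theorem pvLinesA_eq (xs : List String) : ∀ (i : Int) (acc : List Char),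
    pvLinesA i acc xs = acc ++ pvFwd i xs := by
  induction xs with
  | nil => intro i acc; simp [pvLinesA, pvFwd]
  | cons s rest ih =>
    intro i acc
    simp [pvLinesA, pvFwd, ih, List.append_assoc]

theorem pvFwd_append (ys : List String) : ∀ (i : Int) (z : String),
    pvFwd i (ys ++ [z]) = pvFwd i ys ++ (PySem.Int.toStr (i + ys.length)).toList ++ ". ".toList ++ z.toList ++ ['\n'] := by
  induction ys with
  | nil => intro i z; simp [pvFwd]
  | cons s rest ih =>
    intro i z
    simp only [List.cons_append, pvFwd, ih, List.length_cons, List.append_assoc]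
    push_cast
    ring_nf

theorem pvNumbered_eq_take (xs : List String) : ∀ (n : Nat), n ≤ xs.length →
    pvNumbered xs n = pvFwd 1 (xs.take n) := by
  intro n
  induction n with
  | zero => intro _; simp [pvNumbered, pvFwd]
  | succ m ih =>
    intro h
    have hm : m < xs.length := by omega
    have ht : xs.take (m + 1) = xs.take m ++ [xs[m]] := List.take_succ_eq_append_getElem hm
    rw [pvNumbered, ih (by omega), ht, pvFwd_append]
    have : xs.getD m "" = xs[m] := List.getD_eq_getElem xs "" hm
    rw [this]
    have hl : ((xs.take m).length : Int) = (m : Int) := by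
      simp [List.length_take, Nat.min_eq_left (Nat.le_of_lt hm)]
    rw [hl]
    ring_nf

theorem pvNumbered_eq (xs : List String) : pvNumbered xs xs.length = pvFwd 1 xs := by
  rw [pvNumbered_eq_take xs xs.length le_rfl, List.take_length]

theorem format_playbook_py_spec : Claim_equal_format_playbook_py := by
  unfold Claim_equal_format_playbook_py
  intro playbook section_ _
  unfold Spec_format_playbook_py format_playbook_py format_playbook_py_alt
  set d := PySem.Dict.ofList playbook with hd
  by_cases h0 : (!(d.values.any (fun v => !v.isEmpty))) = true
  · simp [h0]
  · simp only [Bool.not_eq_true] at h0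
    simp only [h0]
    set e := d.getD "extraction_strategies" [] with he
    set v := d.getD "validation_strategies" [] with hv
    set f := d.getD "formatting_patterns" [] with hf
    simp only [pvRender, pvLinesA_eq, pvNumbered_eq, List.nil_append]
    simp only [← he, ← hv, ← hf]
    rw [show "EXTRACTION STRATEGIES:".toList ++ ['\n'] = "EXTRACTION STRATEGIES:\n".toList from rfl,
        show "VALIDATION STRATEGIES:".toList ++ ['\n'] = "VALIDATION STRATEGIES:\n".toList from rfl,
        show "FORMATTING PATTERNS:".toList ++ ['\n'] = "FORMATTING PATTERNS:\n".toList from rfl]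
    have n1 : "EXTRACTION STRATEGIES:\n".toList ≠ [] := by decide
    have n2 : "VALIDATION STRATEGIES:\n".toList ≠ [] := by decide
    have n3 : "FORMATTING PATTERNS:\n".toList ≠ [] := by decide
    generalize hg1 : "EXTRACTION STRATEGIES:\n".toList = H1 at n1 ⊢
    generalize hg2 : "VALIDATION STRATEGIES:\n".toList = H2 at n2 ⊢
    generalize hg3 : "FORMATTING PATTERNS:\n".toList = H3 at n3 ⊢
    generalize hFe : pvFwd 1 e = Fe
    generalize hFv : pvFwd 1 v = Fv
    generalize hFf : pvFwd 1 f = Ff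
    by_cases c1 : (section_ = "all" ∨ section_ = "extraction") ∧ e ≠ [] <;>
      by_cases c2 : (section_ = "all" ∨ section_ = "validation") ∧ v ≠ [] <;>
        by_cases c3 : (section_ = "all" ∨ section_ = "formatting") ∧ f ≠ [] <;>
          simp [c1, c2, c3, n1, n2, n3, List.append_assoc]

-- ===== VERDICT (by name: the statement is the Claim_ definition above) =====
-- (theorem above serves as verdict)
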